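-- pv_equiv track=rewrite | github.com/KiUngSong/TerraFin | src/TerraFin/data/providers/corporate/filings/sec_edgar/parser.py | _merge_header_lines
-- ===== SOURCE A (Python) =====
-- def _merge_header_lines(header_rows: list[list[str]]) -> list[str]:
--     """R9: stack multi-row headers column-wise, joined by '\\n' and deduped."""
--     if not header_rows:
--         return []
--     width = len(header_rows[0])
--     stacked: list[str] = []
--     for c in range(width):
--         parts: list[str] = []
--         for row in header_rows:
--             text = row[c].strip() if c < len(row) else ""
--             if text and text not in parts:
--                 parts.append(text)
--         stacked.append("\n".join(parts))
--     return stacked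
-- ===== SOURCE B (Python) =====
-- def _merge_header_lines(header_rows: list[list[str]]) -> list[str]:
--     """R9: stack multi-row headers column-wise, joined by '\n' and deduped."""
--     if not header_rows:
--         return []
--     width = len(header_rows[0])
--
--     def absorb(parts: tuple, cell: str) -> tuple:
--         t = cell.strip()
--         return parts if not t or t in parts else parts + (t,)
--
--     # single row-major pass: rebuild all per-column accumulators from each row at once
--     cols = [()] * width
--     for row in header_rows:
--         cells = row[:width] + [""] * (width - len(row))
--         cols = [absorb(p, c) for p, c in zip(cols, cells)]
--     return ["\n".join(p) for p in cols]
-- ===== Notes on version B (the rewrite author's own statement) =====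
-- stated objective: alternative
-- what changed: Loop interchange: instead of A's column-outer/row-inner nested index loops with a bounds check and a final join per column, B makes a single row-major pass, zipping each width-padded row against a list of immutable per-column accumulator tuples and rebuilding them all at once, joining only at the end.
import Mathlib
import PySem

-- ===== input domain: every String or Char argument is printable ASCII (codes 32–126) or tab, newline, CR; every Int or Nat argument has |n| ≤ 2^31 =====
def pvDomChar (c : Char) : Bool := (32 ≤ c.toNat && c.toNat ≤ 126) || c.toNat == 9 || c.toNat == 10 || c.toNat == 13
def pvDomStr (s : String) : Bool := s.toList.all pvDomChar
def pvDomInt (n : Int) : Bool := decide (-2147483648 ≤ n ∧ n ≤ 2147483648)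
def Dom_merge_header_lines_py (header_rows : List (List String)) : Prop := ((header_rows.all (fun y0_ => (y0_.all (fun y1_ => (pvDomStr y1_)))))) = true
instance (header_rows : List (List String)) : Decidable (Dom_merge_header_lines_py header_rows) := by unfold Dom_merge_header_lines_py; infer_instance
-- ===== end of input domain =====

-- B interchanges the loops: one row-major pass zipping each width-padded row against a
-- list of per-column accumulators, joined at the end (alternative traversal, same cost).

-- ===== PORT A =====
def merge_header_lines_py (header_rows : List (List String)) : List String :=
  if header_rows.isEmpty then []
  else
    let width := (PySem.List.pyGetD header_rows 0 []).length
    (PySem.List.pyRange 0 (width : Int) 1).foldl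
      (fun stacked c =>
        stacked ++ [PySem.Str.join "\n"
          (header_rows.foldl
            (fun parts row =>
              let text := if c < (row.length : Int)
                          then PySem.Str.strip (PySem.List.pyGetD row c "")
                          else ""
              if text ≠ "" ∧ text ∉ parts then parts ++ [text] else parts)
            [])])
      []

-- ===== PORT B =====
-- absorb(parts, cell): append the stripped cell unless empty or already present
def pvAbsorb (parts : List String) (cell : String) : List String :=
  let t := PySem.Str.strip cell
  if t = "" ∨ t ∈ parts then parts else parts ++ [t]

def merge_header_lines_py_alt (header_rows : List (List String)) : List String :=
  if header_rows.isEmpty then []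
  else
    let width := (PySem.List.pyGetD header_rows 0 []).length
    -- row[:width] + [""] * (width - len(row)) : take is exact for a nonneg slice bound
    let cols := header_rows.foldl
      (fun cols row =>
        let cells := row.take width ++ List.replicate (width - row.length) ""
        (cols.zip cells).map (fun pc => pvAbsorb pc.1 pc.2))
      (List.replicate width ([] : List String))
    cols.map (fun p => PySem.Str.join "\n" p)

-- ===== PRECONDITION & SPEC =====
def Spec_merge_header_lines_py (header_rows : List (List String)) (out : List String) : Prop := out = merge_header_lines_py_alt header_rows
instance (header_rows : List (List String)) (out : List String) : Decidable (Spec_merge_header_lines_py header_rows out) := by unfold Spec_merge_header_lines_py; infer_instance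

-- ===== CLAIM (what is proved, stated in full; the proofs are below) =====
def Claim_equal_merge_header_lines_py : Prop := ∀ (header_rows : List (List String)), Dom_merge_header_lines_py header_rows → Spec_merge_header_lines_py header_rows (merge_header_lines_py header_rows)

-- ===== LEMMAS AND PROOFS =====

-- row[:width]-padding indexed at c < width is A's bounds-checked, defaulted cell
theorem pad_getD (row : List String) (width c : Nat) (hc : c < width) :
    (row.take width ++ List.replicate (width - row.length) "").getD c ""
      = if c < row.length then row.getD c "" else "" := by
  by_cases h : c < row.length
  · have hmin : c < (row.take width).length := by simp [List.length_take]; omega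
    rw [List.getD_eq_getElem?_getD, List.getElem?_append_left hmin,
        List.getElem?_take_of_lt hc]
    simp [h, List.getD_eq_getElem?_getD]
  · have hge : (row.take width).length ≤ c := by simp [List.length_take]; omega
    rw [List.getD_eq_getElem?_getD, List.getElem?_append_right hge]
    simp [h]

-- zipping a map over range with a length-w list pairs index c with the c-th element
theorem zip_map_range {α β : Type} (w : Nat) (f : Nat → α) (l : List β) (d : β)
    (hl : l.length = w) :
    ((List.range w).map f).zip l = (List.range w).map (fun c => (f c, l.getD c d)) := by
  apply List.ext_getElem
  · simp [hl]
  · intro i h1 h2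
    simp only [List.length_zip, List.length_map, List.length_range, hl, Nat.min_self] at h1
    simp [List.getElem_zip, List.getD_eq_getElem?_getD, List.getElem?_eq_getElem (hl ▸ h1)]

-- the invariant of B's row-major pass: after any prefix of rows, the accumulator list
-- holds, per column c, the fold of pvAbsorb over that prefix's padded c-cells
theorem cols_inv (w : Nat) (rs : List (List String)) :
    rs.foldl
        (fun cols row =>
          (cols.zip (row.take w ++ List.replicate (w - row.length) "")).map
            (fun pc => pvAbsorb pc.1 pc.2))
        (List.replicate w ([] : List String))
      = (List.range w).map (fun c =>
          rs.foldl (fun p row =>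
            pvAbsorb p ((row.take w ++ List.replicate (w - row.length) "").getD c "")) []) := by
  induction rs using List.reverseRecOn with
  | nil => simp [List.map_const']
  | append_singleton rs row ih =>
    rw [List.foldl_append, List.foldl_cons, List.foldl_nil, ih]
    have hlen : (row.take w ++ List.replicate (w - row.length) "").length = w := by
      simp [List.length_take]; omega
    rw [zip_map_range w _ _ "" hlen, List.map_map]
    apply List.map_congr_left
    intro c _
    simp [List.foldl_append]

-- ===== VERDICT (by name: the statement is the Claim_ definition above) =====
theorem merge_header_lines_py_spec : Claim_equal_merge_header_lines_py := by
  unfold Claim_equal_merge_header_lines_py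
  intro header_rows _
  unfold Spec_merge_header_lines_py merge_header_lines_py merge_header_lines_py_alt
  by_cases hemp : header_rows.isEmpty
  · simp [hemp]
  · rw [if_neg hemp, if_neg hemp]
    dsimp only
    rw [cols_inv ((PySem.List.pyGetD header_rows 0 []).length) header_rows, List.map_map,
        PySem.List.foldl_append_singleton_eq_map, List.nil_append,
        PySem.List.pyRange_zero_nat ((PySem.List.pyGetD header_rows 0 []).length), List.map_map]
    apply List.map_congr_left
    intro c hc
    have hcw : c < (PySem.List.pyGetD header_rows 0 []).length := List.mem_range.mp hc
    dsimp only [Function.comp]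
    refine congrArg (PySem.Str.join "\n") ?_
    refine PySem.List.foldl_congr_mem header_rows _ _ [] ?_
    intro parts row _
    have ht : PySem.Str.strip ((row.take ((PySem.List.pyGetD header_rows 0 []).length) ++
          List.replicate ((PySem.List.pyGetD header_rows 0 []).length - row.length) "").getD c "")
        = if ((c : Nat) : Int) < (row.length : Int)
          then PySem.Str.strip (PySem.List.pyGetD row ((c : Nat) : Int) "") else "" := by
      rw [pad_getD row _ c hcw]
      by_cases h : c < row.length
      · have h' : ((c : Nat) : Int) < (row.length : Int) := by exact_mod_cast h
        rw [if_pos h, if_pos h', PySem.List.pyGetD_natCast]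
      · have h' : ¬ ((c : Nat) : Int) < (row.length : Int) := by exact_mod_cast h
        rw [if_neg h, if_neg h']
        decide
    show _ = pvAbsorb parts _
    unfold pvAbsorb
    dsimp only
    rw [ht]
    by_cases hm : (if ((c : Nat) : Int) < (row.length : Int)
          then PySem.Str.strip (PySem.List.pyGetD row ((c : Nat) : Int) "") else "") = ""
        ∨ (if ((c : Nat) : Int) < (row.length : Int)
          then PySem.Str.strip (PySem.List.pyGetD row ((c : Nat) : Int) "") else "") ∈ parts
    · rw [if_pos hm, if_neg (fun hcon => hm.elim (fun h => hcon.1 h) (fun h => hcon.2 h))]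
    · rw [if_neg hm, if_pos ⟨fun h => hm (Or.inl h), fun h => hm (Or.inr h)⟩]
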